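-- pv_equiv track=rewrite | github.com/SzymonLitwicki/FGSM-and-PGD-Attacks-Detector | 02_feature_comparison_analysis.py | get_feature_categories
-- ===== SOURCE A (Python) =====
-- def get_feature_categories(feature_cols):
--     """Categorize features by type."""
--     return {
--         'Pixel Statistics': [f for f in feature_cols if f.startswith('pixel_')],
--         'Channel Statistics': [f for f in feature_cols if f.startswith(('R_', 'G_', 'B_'))],
--         'Frequency Features': [f for f in feature_cols if f.startswith(('freq_', 'low_freq', 'high_freq', 'spectral'))],
--         'Gradient Features': [f for f in feature_cols if f.startswith(('gradient_', 'total_variation', 'tv_', 'edge_'))],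
--         'Color Features': [f for f in feature_cols if f.startswith(('corr_', 'luminance', 'saturation', 'color_'))],
--         'Texture Features': [f for f in feature_cols if f.startswith(('texture_', 'local_contrast', 'homogeneity'))]
--     }
-- ===== SOURCE B (Python) =====
-- _CATEGORIES = [
--     ('Pixel Statistics', ('pixel_',)),
--     ('Channel Statistics', ('R_', 'G_', 'B_')),
--     ('Frequency Features', ('freq_', 'low_freq', 'high_freq', 'spectral')),
--     ('Gradient Features', ('gradient_', 'total_variation', 'tv_', 'edge_')),
--     ('Color Features', ('corr_', 'luminance', 'saturation', 'color_')),
--     ('Texture Features', ('texture_', 'local_contrast', 'homogeneity')),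
-- ]
--
--
-- def get_feature_categories(feature_cols):
--     """Categorize features by type: table-driven single pass, first-match dispatch."""
--     result = {name: [] for name, _ in _CATEGORIES}
--     for f in feature_cols:
--         for name, prefixes in _CATEGORIES:
--             if f.startswith(prefixes):
--                 result[name].append(f)
--                 break
--     return result
-- ===== Notes on version B (the rewrite author's own statement) =====
-- stated objective: alternative
-- what changed: Replaces A's six separate list-comprehension scans (one hard-coded per category) by a table-driven single pass: a (name, prefixes) table, one dict of empty lists, and for each feature a first-match walk over the table with break; correct because the prefix groups are pairwise disjoint, so first-match equals each per-category filter.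
import Mathlib
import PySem

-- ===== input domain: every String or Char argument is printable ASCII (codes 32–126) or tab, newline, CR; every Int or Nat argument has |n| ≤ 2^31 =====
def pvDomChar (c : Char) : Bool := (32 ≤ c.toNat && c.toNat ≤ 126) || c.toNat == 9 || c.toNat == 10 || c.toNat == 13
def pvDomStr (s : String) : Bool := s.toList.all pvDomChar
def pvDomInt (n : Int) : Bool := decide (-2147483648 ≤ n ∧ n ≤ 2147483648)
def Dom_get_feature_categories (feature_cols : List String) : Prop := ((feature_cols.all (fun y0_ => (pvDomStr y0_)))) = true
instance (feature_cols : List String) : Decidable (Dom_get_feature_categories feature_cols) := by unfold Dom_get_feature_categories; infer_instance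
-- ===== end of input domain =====

-- B replaces A's six hard-coded comprehension scans by a table-driven single pass:
-- a (name, prefixes) table, a dict of empty lists, and a first-match dispatch with
-- break per feature (objective: alternative; correct since the prefix groups are disjoint).


-- ===== PORT A ===== (six comprehension scans with hard-coded prefix tests, assembled into the dict literal)
def get_feature_categories (feature_cols : List String) : List (String × List String) :=
  [("Pixel Statistics",
      feature_cols.filter (fun f => PySem.Str.startswith f "pixel_")),
   ("Channel Statistics",
      feature_cols.filter (fun f =>
        PySem.Str.startswith f "R_" || PySem.Str.startswith f "G_" || PySem.Str.startswith f "B_")),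
   ("Frequency Features",
      feature_cols.filter (fun f =>
        PySem.Str.startswith f "freq_" || PySem.Str.startswith f "low_freq" ||
        PySem.Str.startswith f "high_freq" || PySem.Str.startswith f "spectral")),
   ("Gradient Features",
      feature_cols.filter (fun f =>
        PySem.Str.startswith f "gradient_" || PySem.Str.startswith f "total_variation" ||
        PySem.Str.startswith f "tv_" || PySem.Str.startswith f "edge_")),
   ("Color Features",
      feature_cols.filter (fun f =>
        PySem.Str.startswith f "corr_" || PySem.Str.startswith f "luminance" ||
        PySem.Str.startswith f "saturation" || PySem.Str.startswith f "color_")),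
   ("Texture Features",
      feature_cols.filter (fun f =>
        PySem.Str.startswith f "texture_" || PySem.Str.startswith f "local_contrast" ||
        PySem.Str.startswith f "homogeneity"))]

-- ===== PORT B ===== (table-driven: dict of empty lists, first-match dispatch with break)
-- _CATEGORIES
def gfcTable : List (String × List String) :=
  [("Pixel Statistics", ["pixel_"]),
   ("Channel Statistics", ["R_", "G_", "B_"]),
   ("Frequency Features", ["freq_", "low_freq", "high_freq", "spectral"]),
   ("Gradient Features", ["gradient_", "total_variation", "tv_", "edge_"]),
   ("Color Features", ["corr_", "luminance", "saturation", "color_"]),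
   ("Texture Features", ["texture_", "local_contrast", "homogeneity"])]

-- f.startswith(prefixes)  (tuple argument = any of the prefixes)
def gfcMatch (f : String) (prefixes : List String) : Bool :=
  prefixes.any (fun p => PySem.Str.startswith f p)

-- 'for name, prefixes in _CATEGORIES: if f.startswith(prefixes): result[name].append(f); break'
def gfcDispatch (f : String) :
    List (String × List String) → PySem.Dict String (List String) → PySem.Dict String (List String)
  | [], d => d
  | (name, prefixes) :: rest, d =>
      if gfcMatch f prefixes then d.modify name [] (fun l => l ++ [f])
      else gfcDispatch f rest d

def get_feature_categories_alt (feature_cols : List String) : List (String × List String) :=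
  -- result = {name: [] for name, _ in _CATEGORIES}
  let init : PySem.Dict String (List String) :=
    gfcTable.foldl (fun d p => d.insert p.1 []) PySem.Dict.empty
  -- for f in feature_cols: <first-match dispatch over the table>
  (feature_cols.foldl (fun d f => gfcDispatch f gfcTable d) init).items

-- ===== PRECONDITION & SPEC =====
def Spec_get_feature_categories (feature_cols : List String) (out : List (String × List String)) : Prop := out = get_feature_categories_alt feature_cols
instance (feature_cols : List String) (out : List (String × List String)) : Decidable (Spec_get_feature_categories feature_cols out) := by unfold Spec_get_feature_categories; infer_instance

-- ===== CLAIM (what is proved, stated in full; the proofs are below) =====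
def Claim_equal_get_feature_categories : Prop := ∀ (feature_cols : List String), Dom_get_feature_categories feature_cols → Spec_get_feature_categories feature_cols (get_feature_categories feature_cols)

-- ===== LEMMAS AND PROOFS =====

-- proof-only abbreviations for the six prefix tests
def p1 (f : String) : Bool := PySem.Str.startswith f "pixel_"
def p2 (f : String) : Bool :=
  PySem.Str.startswith f "R_" || PySem.Str.startswith f "G_" || PySem.Str.startswith f "B_"
def p3 (f : String) : Bool :=
  PySem.Str.startswith f "freq_" || PySem.Str.startswith f "low_freq" ||
  PySem.Str.startswith f "high_freq" || PySem.Str.startswith f "spectral"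
def p4 (f : String) : Bool :=
  PySem.Str.startswith f "gradient_" || PySem.Str.startswith f "total_variation" ||
  PySem.Str.startswith f "tv_" || PySem.Str.startswith f "edge_"
def p5 (f : String) : Bool :=
  PySem.Str.startswith f "corr_" || PySem.Str.startswith f "luminance" ||
  PySem.Str.startswith f "saturation" || PySem.Str.startswith f "color_"
def p6 (f : String) : Bool :=
  PySem.Str.startswith f "texture_" || PySem.Str.startswith f "local_contrast" ||
  PySem.Str.startswith f "homogeneity"

-- two incomparable prefixes cannot both be prefixes of the same string
theorem sw_excl (s q1 q2 : String) (h12 : ¬ q1.toList <+: q2.toList) (h21 : ¬ q2.toList <+: q1.toList)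
    (h : PySem.Str.startswith s q1 = true) : PySem.Str.startswith s q2 = false := by
  rw [PySem.Str.startswith_eq] at h ⊢
  rw [PySem.Chars.startswith_iff] at h
  by_contra hc
  have hc' : PySem.Chars.startswith s.toList q2.toList = true := by
    cases hx : PySem.Chars.startswith s.toList q2.toList
    · exact absurd hx hc
    · rfl
  rw [PySem.Chars.startswith_iff] at hc'
  rcases List.prefix_or_prefix_of_prefix h hc' with h' | h'
  · exact h12 h'
  · exact h21 h'

theorem excl2 (s : String) (h : p2 s = true) : p1 s = false := by
  simp only [p2, p1, Bool.or_eq_true] at h ⊢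
  rcases h with (h | h) | h <;> exact sw_excl _ _ _ (by decide) (by decide) h

theorem excl3 (s : String) (h : p3 s = true) : p1 s = false ∧ p2 s = false := by
  simp only [p3, p1, p2, Bool.or_eq_true, Bool.or_eq_false_iff] at h ⊢
  rcases h with ((h | h) | h) | h <;> and_intros <;> exact sw_excl _ _ _ (by decide) (by decide) h

theorem excl4 (s : String) (h : p4 s = true) :
    p1 s = false ∧ p2 s = false ∧ p3 s = false := by
  simp only [p4, p1, p2, p3, Bool.or_eq_true, Bool.or_eq_false_iff] at h ⊢
  rcases h with ((h | h) | h) | h <;> and_intros <;> exact sw_excl _ _ _ (by decide) (by decide) h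

theorem excl5 (s : String) (h : p5 s = true) :
    p1 s = false ∧ p2 s = false ∧ p3 s = false ∧ p4 s = false := by
  simp only [p5, p1, p2, p3, p4, Bool.or_eq_true, Bool.or_eq_false_iff] at h ⊢
  rcases h with ((h | h) | h) | h <;> and_intros <;> exact sw_excl _ _ _ (by decide) (by decide) h

theorem excl6 (s : String) (h : p6 s = true) :
    p1 s = false ∧ p2 s = false ∧ p3 s = false ∧ p4 s = false ∧ p5 s = false := by
  simp only [p6, p1, p2, p3, p4, p5, Bool.or_eq_true, Bool.or_eq_false_iff] at h ⊢
  rcases h with (h | h) | h <;> and_intros <;> exact sw_excl _ _ _ (by decide) (by decide) h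

-- evaluating the first-match walk over the literal table, at the level of p1..p6
theorem gfcDispatch_eval (x : String) (d : PySem.Dict String (List String)) :
    gfcDispatch x gfcTable d =
      if p1 x = true then d.modify "Pixel Statistics" [] (fun l => l ++ [x])
      else if p2 x = true then d.modify "Channel Statistics" [] (fun l => l ++ [x])
      else if p3 x = true then d.modify "Frequency Features" [] (fun l => l ++ [x])
      else if p4 x = true then d.modify "Gradient Features" [] (fun l => l ++ [x])
      else if p5 x = true then d.modify "Color Features" [] (fun l => l ++ [x])
      else if p6 x = true then d.modify "Texture Features" [] (fun l => l ++ [x])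
      else d := by
  simp only [gfcTable, gfcDispatch, gfcMatch, List.any_cons, List.any_nil, Bool.or_false,
    Bool.or_assoc, p1, p2, p3, p4, p5, p6]

-- the single-pass dispatch loop, characterised on the concrete six-entry dict
theorem loop_eq (cols : List String) (a b c d e f : List String) :
    cols.foldl (fun d' f' => gfcDispatch f' gfcTable d')
      (PySem.Dict.mk [("Pixel Statistics", a), ("Channel Statistics", b),
        ("Frequency Features", c), ("Gradient Features", d),
        ("Color Features", e), ("Texture Features", f)]) =
    PySem.Dict.mk
      [("Pixel Statistics", a ++ cols.filter p1),
       ("Channel Statistics", b ++ cols.filter (fun x => !p1 x && p2 x)),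
       ("Frequency Features", c ++ cols.filter (fun x => !p1 x && !p2 x && p3 x)),
       ("Gradient Features", d ++ cols.filter (fun x => !p1 x && !p2 x && !p3 x && p4 x)),
       ("Color Features", e ++ cols.filter (fun x => !p1 x && !p2 x && !p3 x && !p4 x && p5 x)),
       ("Texture Features", f ++ cols.filter (fun x => !p1 x && !p2 x && !p3 x && !p4 x && !p5 x && p6 x))] := by
  induction cols generalizing a b c d e f with
  | nil => simp
  | cons x xs ih =>
    rw [List.foldl_cons, gfcDispatch_eval]
    by_cases h1 : p1 x = true
    · rw [if_pos h1, show (PySem.Dict.mk [("Pixel Statistics", a), ("Channel Statistics", b),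
          ("Frequency Features", c), ("Gradient Features", d), ("Color Features", e),
          ("Texture Features", f)]).modify "Pixel Statistics" [] (fun l => l ++ [x])
          = PySem.Dict.mk [("Pixel Statistics", a ++ [x]), ("Channel Statistics", b),
          ("Frequency Features", c), ("Gradient Features", d), ("Color Features", e),
          ("Texture Features", f)] from by
        simp [PySem.Dict.modify, PySem.Dict.insert, PySem.Dict.get?, PySem.Dict.getD], ih]
      simp [h1]
    · rw [if_neg h1]; rw [Bool.not_eq_true] at h1
      by_cases h2 : p2 x = true
      · rw [if_pos h2, show (PySem.Dict.mk [("Pixel Statistics", a), ("Channel Statistics", b),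
            ("Frequency Features", c), ("Gradient Features", d), ("Color Features", e),
            ("Texture Features", f)]).modify "Channel Statistics" [] (fun l => l ++ [x])
            = PySem.Dict.mk [("Pixel Statistics", a), ("Channel Statistics", b ++ [x]),
            ("Frequency Features", c), ("Gradient Features", d), ("Color Features", e),
            ("Texture Features", f)] from by
          simp [PySem.Dict.modify, PySem.Dict.insert, PySem.Dict.get?, PySem.Dict.getD], ih]
        simp [h1, h2]
      · rw [if_neg h2]; rw [Bool.not_eq_true] at h2
        by_cases h3 : p3 x = true
        · rw [if_pos h3, show (PySem.Dict.mk [("Pixel Statistics", a), ("Channel Statistics", b),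
              ("Frequency Features", c), ("Gradient Features", d), ("Color Features", e),
              ("Texture Features", f)]).modify "Frequency Features" [] (fun l => l ++ [x])
              = PySem.Dict.mk [("Pixel Statistics", a), ("Channel Statistics", b),
              ("Frequency Features", c ++ [x]), ("Gradient Features", d), ("Color Features", e),
              ("Texture Features", f)] from by
            simp [PySem.Dict.modify, PySem.Dict.insert, PySem.Dict.get?, PySem.Dict.getD], ih]
          simp [h1, h2, h3]
        · rw [if_neg h3]; rw [Bool.not_eq_true] at h3
          by_cases h4 : p4 x = true
          · rw [if_pos h4, show (PySem.Dict.mk [("Pixel Statistics", a), ("Channel Statistics", b),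
                ("Frequency Features", c), ("Gradient Features", d), ("Color Features", e),
                ("Texture Features", f)]).modify "Gradient Features" [] (fun l => l ++ [x])
                = PySem.Dict.mk [("Pixel Statistics", a), ("Channel Statistics", b),
                ("Frequency Features", c), ("Gradient Features", d ++ [x]), ("Color Features", e),
                ("Texture Features", f)] from by
              simp [PySem.Dict.modify, PySem.Dict.insert, PySem.Dict.get?, PySem.Dict.getD], ih]
            simp [h1, h2, h3, h4]
          · rw [if_neg h4]; rw [Bool.not_eq_true] at h4
            by_cases h5 : p5 x = true
            · rw [if_pos h5, show (PySem.Dict.mk [("Pixel Statistics", a), ("Channel Statistics", b),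
                  ("Frequency Features", c), ("Gradient Features", d), ("Color Features", e),
                  ("Texture Features", f)]).modify "Color Features" [] (fun l => l ++ [x])
                  = PySem.Dict.mk [("Pixel Statistics", a), ("Channel Statistics", b),
                  ("Frequency Features", c), ("Gradient Features", d), ("Color Features", e ++ [x]),
                  ("Texture Features", f)] from by
                simp [PySem.Dict.modify, PySem.Dict.insert, PySem.Dict.get?, PySem.Dict.getD], ih]
              simp [h1, h2, h3, h4, h5]
            · rw [if_neg h5]; rw [Bool.not_eq_true] at h5
              by_cases h6 : p6 x = true
              · rw [if_pos h6, show (PySem.Dict.mk [("Pixel Statistics", a), ("Channel Statistics", b),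
                    ("Frequency Features", c), ("Gradient Features", d), ("Color Features", e),
                    ("Texture Features", f)]).modify "Texture Features" [] (fun l => l ++ [x])
                    = PySem.Dict.mk [("Pixel Statistics", a), ("Channel Statistics", b),
                    ("Frequency Features", c), ("Gradient Features", d), ("Color Features", e),
                    ("Texture Features", f ++ [x])] from by
                  simp [PySem.Dict.modify, PySem.Dict.insert, PySem.Dict.get?, PySem.Dict.getD], ih]
                simp [h1, h2, h3, h4, h5, h6]
              · rw [if_neg h6]; rw [Bool.not_eq_true] at h6
                rw [ih]
                simp [h1, h2, h3, h4, h5, h6]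

-- first-match conditions collapse to the plain prefix tests (disjointness)
theorem filter2 (l : List String) :
    l.filter (fun x => !p1 x && p2 x) = l.filter p2 := by
  apply List.filter_congr; intro x _
  cases h : p2 x
  · simp
  · simp [excl2 x h]

theorem filter3 (l : List String) :
    l.filter (fun x => !p1 x && !p2 x && p3 x) = l.filter p3 := by
  apply List.filter_congr; intro x _
  cases h : p3 x
  · simp
  · obtain ⟨e1, e2⟩ := excl3 x h
    simp [e1, e2]

theorem filter4 (l : List String) :
    l.filter (fun x => !p1 x && !p2 x && !p3 x && p4 x) = l.filter p4 := by
  apply List.filter_congr; intro x _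
  cases h : p4 x
  · simp
  · obtain ⟨e1, e2, e3⟩ := excl4 x h
    simp [e1, e2, e3]

theorem filter5 (l : List String) :
    l.filter (fun x => !p1 x && !p2 x && !p3 x && !p4 x && p5 x) = l.filter p5 := by
  apply List.filter_congr; intro x _
  cases h : p5 x
  · simp
  · obtain ⟨e1, e2, e3, e4⟩ := excl5 x h
    simp [e1, e2, e3, e4]

theorem filter6 (l : List String) :
    l.filter (fun x => !p1 x && !p2 x && !p3 x && !p4 x && !p5 x && p6 x) = l.filter p6 := by
  apply List.filter_congr; intro x _
  cases h : p6 x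
  · simp
  · obtain ⟨e1, e2, e3, e4, e5⟩ := excl6 x h
    simp [e1, e2, e3, e4, e5]

-- ===== VERDICT (by name: the statement is the Claim_ definition above) =====
theorem get_feature_categories_spec : Claim_equal_get_feature_categories := by
  intro cols _
  unfold Spec_get_feature_categories get_feature_categories get_feature_categories_alt
  have hinit : gfcTable.foldl (fun d p => d.insert p.1 ([] : List String)) PySem.Dict.empty =
      PySem.Dict.mk [("Pixel Statistics", []), ("Channel Statistics", []),
        ("Frequency Features", []), ("Gradient Features", []),
        ("Color Features", []), ("Texture Features", [])] := by decide
  dsimp only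
  rw [hinit, loop_eq, filter2, filter3, filter4, filter5, filter6]
  simp only [List.nil_append]
  rfl
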